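-- pv_equiv track=rewrite | github.com/aspose-cells-python/aspose-cells-python | aspose/cells/converters/markdown_converter.py | _generate_column_header
-- ===== SOURCE A (Python) =====
-- def _generate_column_header(cell_value: str, column_index: int) -> str:
--     """Generate intelligent column headers."""
--     if cell_value and str(cell_value).strip():
--         header = str(cell_value).strip()
--         # Don't use generic names if we have meaningful content
--         if not header.startswith(('Unnamed', 'Col', 'Column')):
--             return header
--
--     # Generate Excel-style column names (A, B, C, ..., AA, AB, etc.)
--     result = ""
--     col_num = column_index
--     while col_num >= 0:
--         result = chr(col_num % 26 + ord('A')) + result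
--         col_num = col_num // 26 - 1
--         if col_num < 0:
--             break
--
--     return result if result else f"Col{column_index + 1}"
-- ===== SOURCE B (Python) =====
-- def _generate_column_header(cell_value: str, column_index: int) -> str:
--     """Generate intelligent column headers."""
--     if cell_value and str(cell_value).strip():
--         header = str(cell_value).strip()
--         if not header.startswith(('Unnamed', 'Col', 'Column')):
--             return header
--
--     def _letters(n):
--         # recursive base-26 bijective conversion, built front-first
--         return "" if n < 0 else _letters(n // 26 - 1) + chr(n % 26 + ord('A'))
--
--     result = _letters(column_index)
--     return result if result else f"Col{column_index + 1}"
-- ===== Notes on version B (the rewrite author's own statement) =====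
-- stated objective: alternative
-- what changed: The iterative while-loop base-26 conversion with prepend-accumulator is replaced by a recursive helper that builds the letters front-first by appending; the guard and fallback stay the same.
import Mathlib
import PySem

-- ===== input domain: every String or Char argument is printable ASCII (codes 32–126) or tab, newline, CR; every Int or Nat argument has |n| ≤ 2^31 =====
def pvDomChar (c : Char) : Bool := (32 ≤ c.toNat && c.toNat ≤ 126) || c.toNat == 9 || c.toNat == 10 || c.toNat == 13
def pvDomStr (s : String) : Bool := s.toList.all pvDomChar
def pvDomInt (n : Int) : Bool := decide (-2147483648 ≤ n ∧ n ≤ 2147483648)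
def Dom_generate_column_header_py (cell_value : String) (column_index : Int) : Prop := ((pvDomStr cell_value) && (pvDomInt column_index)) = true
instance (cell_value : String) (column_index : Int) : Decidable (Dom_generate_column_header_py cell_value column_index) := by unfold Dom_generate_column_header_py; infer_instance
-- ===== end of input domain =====

-- B replaces A's iterative prepend-accumulator base-26 loop with a recursive append-building helper (alternative decomposition, same cost).

-- ===== PORT A =====
-- the while-loop: result = chr(col_num % 26 + ord('A')) + result; col_num = col_num // 26 - 1; break if col_num < 0
def pvALoop (col_num : Int) (result : List Char) : List Char :=
  if 0 ≤ col_num then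
    let result' := Char.ofNat ((PySem.Int.mod col_num 26).toNat + 65) :: result
    let col_num' := PySem.Int.floordiv col_num 26 - 1
    if _h : col_num' < 0 then result'
    else pvALoop col_num' result'
  else result
termination_by (col_num + 1).toNat
decreasing_by
  have h26 : PySem.Int.floordiv col_num 26 = col_num / 26 :=
    PySem.Int.floordiv_eq_ediv_of_pos (by norm_num)
  simp only [col_num'] at *
  omega

def generate_column_header_py (cell_value : String) (column_index : Int) : String :=
  let fallback :=
    let result := pvALoop column_index []
    if result ≠ [] then String.ofList result
    else String.ofList (['C', 'o', 'l'] ++ PySem.Int.toChars (column_index + 1))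
  if cell_value ≠ "" ∧ PySem.Str.strip cell_value ≠ "" then
    let header := PySem.Str.strip cell_value
    if ¬ (PySem.Str.startswith header "Unnamed" ∨ PySem.Str.startswith header "Col" ∨ PySem.Str.startswith header "Column") then
      header
    else fallback
  else fallback

-- ===== PORT B =====
-- recursive helper: '' if n < 0 else _letters(n // 26 - 1) + chr(n % 26 + ord('A'))
def pvLetters (n : Int) : List Char :=
  if n < 0 then []
  else pvLetters (PySem.Int.floordiv n 26 - 1) ++ [Char.ofNat ((PySem.Int.mod n 26).toNat + 65)]
termination_by (n + 1).toNat
decreasing_by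
  have h26 : PySem.Int.floordiv n 26 = n / 26 :=
    PySem.Int.floordiv_eq_ediv_of_pos (by norm_num)
  omega

def generate_column_header_py_alt (cell_value : String) (column_index : Int) : String :=
  if cell_value ≠ "" ∧ PySem.Str.strip cell_value ≠ "" then
    let header := PySem.Str.strip cell_value
    if ¬ (PySem.Str.startswith header "Unnamed" ∨ PySem.Str.startswith header "Col" ∨ PySem.Str.startswith header "Column") then
      header
    else
      let result := pvLetters column_index
      if result ≠ [] then String.ofList result
      else String.ofList (['C', 'o', 'l'] ++ PySem.Int.toChars (column_index + 1))
  else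
    let result := pvLetters column_index
    if result ≠ [] then String.ofList result
    else String.ofList (['C', 'o', 'l'] ++ PySem.Int.toChars (column_index + 1))

-- ===== PRECONDITION & SPEC =====
def Spec_generate_column_header_py (cell_value : String) (column_index : Int) (out : String) : Prop := out = generate_column_header_py_alt cell_value column_index
instance (cell_value : String) (column_index : Int) (out : String) : Decidable (Spec_generate_column_header_py cell_value column_index out) := by unfold Spec_generate_column_header_py; infer_instance

-- ===== CLAIM (what is proved, stated in full; the proofs are below) =====
def Claim_equal_generate_column_header_py : Prop := ∀ (cell_value : String) (column_index : Int), Dom_generate_column_header_py cell_value column_index → Spec_generate_column_header_py cell_value column_index (generate_column_header_py cell_value column_index)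

-- ===== LEMMAS AND PROOFS =====

-- A's loop with accumulator computes B's letters followed by the accumulator.
lemma pvALoop_eq_letters_aux : ∀ (k : Nat) (n : Int), (n + 1).toNat ≤ k → ∀ (acc : List Char), pvALoop n acc = pvLetters n ++ acc := by
  intro k
  induction k with
  | zero =>
    intro n h acc
    have hn : n < 0 := by omega
    rw [pvALoop, pvLetters]
    simp [not_le.mpr hn, hn]
  | succ k ih =>
    intro n h acc
    by_cases hn : n < 0
    · rw [pvALoop, pvLetters]
      simp [not_le.mpr hn, hn]
    · rw [not_lt] at hn
      have h26 : PySem.Int.floordiv n 26 = n / 26 :=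
        PySem.Int.floordiv_eq_ediv_of_pos (by norm_num)
      by_cases hn' : PySem.Int.floordiv n 26 - 1 < 0
      · rw [pvALoop]
        conv_rhs => rw [pvLetters]
        simp only [hn, if_true, if_neg (not_lt.mpr hn), dif_pos hn']
        conv_rhs => rw [pvLetters]
        rw [h26] at hn'
        simp [hn']
      · have hk : ((PySem.Int.floordiv n 26 - 1) + 1).toNat ≤ k := by
          rw [h26]; omega
        rw [pvALoop]
        conv_rhs => rw [pvLetters]
        simp only [hn, if_neg (not_lt.mpr hn), dif_neg hn']
        rw [ih _ hk]
        simp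

lemma pvALoop_eq_letters (n : Int) : pvALoop n [] = pvLetters n :=
  (pvALoop_eq_letters_aux (n + 1).toNat n le_rfl []).trans (by simp)

-- ===== VERDICT (by name: the statement is the Claim_ definition above) =====
theorem generate_column_header_py_spec : Claim_equal_generate_column_header_py := by
  intro cell_value column_index _
  unfold Spec_generate_column_header_py generate_column_header_py generate_column_header_py_alt
  rw [pvALoop_eq_letters]
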